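-- pv_equiv track=rewrite | github.com/travisoneill/project-euler | 580.py | find_cycle
-- ===== SOURCE A (Python) =====
-- def find_cycle(lst):
--     cycle = 1
--     while cycle < len(lst):
--         for i in range(len(lst) - cycle):
--             if lst[i] != lst[i + cycle]:
--                 break
--         else:
--             return cycle
--         cycle += 1
-- ===== SOURCE B (Python) =====
-- def find_cycle(lst):
--     # KMP prefix (failure) function; minimal period = n - pi[n-1]
--     n = len(lst)
--     if n == 0:
--         return None
--     pi = [0] * n
--     for i in range(1, n):
--         x = lst[i]
--         k = pi[i - 1]
--         while k and x != lst[k]: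
--             k = pi[k - 1]
--         if x == lst[k]:
--             k += 1
--         pi[i] = k
--     p = n - pi[n - 1]
--     return p if p < n else None
-- ===== Notes on version B (the rewrite author's own statement) =====
-- stated objective: alternative
-- what changed: Replaced the nested scan over candidate periods by the KMP prefix (failure) function computed in one left-to-right pass; the minimal period is n - pi[n-1], or None when that is not < n.
import Mathlib
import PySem

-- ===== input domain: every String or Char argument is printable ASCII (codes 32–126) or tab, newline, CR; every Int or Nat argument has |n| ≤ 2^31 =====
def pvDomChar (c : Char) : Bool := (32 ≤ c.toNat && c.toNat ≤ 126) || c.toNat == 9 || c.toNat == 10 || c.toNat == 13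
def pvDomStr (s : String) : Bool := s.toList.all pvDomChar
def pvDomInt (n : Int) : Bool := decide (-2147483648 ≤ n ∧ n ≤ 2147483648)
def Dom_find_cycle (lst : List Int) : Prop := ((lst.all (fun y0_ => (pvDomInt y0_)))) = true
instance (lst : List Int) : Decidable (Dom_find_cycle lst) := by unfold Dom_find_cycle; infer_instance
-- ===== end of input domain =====

-- B replaces A's nested scan over candidate periods by a single left-to-right
-- pass computing the KMP prefix (failure) function: the minimal period is
-- n - pi[n-1] (None if that is not < n).

-- ===== PORT A =====
-- inner `for i in range(len(lst)-cycle): … break / else: return cycle`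
def fcCheck (lst : List Int) (cycle : Nat) : Bool :=
  (List.range (lst.length - cycle)).all (fun i => lst.getD i 0 == lst.getD (i + cycle) 0)

-- outer `while cycle < len(lst): … cycle += 1`
def fcLoop (lst : List Int) (cycle : Nat) : Option Int :=
  if cycle < lst.length then
    if fcCheck lst cycle then some (cycle : Int)
    else fcLoop lst (cycle + 1)
  else none
termination_by lst.length - cycle

def find_cycle (lst : List Int) : Option Int := fcLoop lst 1

-- ===== PORT B =====
-- `while k and x != lst[k]: k = pi[k-1]`; the `k' < k` guard only ensures
-- termination (it always holds during execution since pi[k-1] ≤ k-1).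
def kmpDescend (lst : List Int) (pi : List Nat) (x : Int) (k : Nat) : Nat :=
  if k = 0 then 0
  else if x == lst.getD k 0 then k
  else
    let k' := pi.getD (k - 1) 0
    if _h : k' < k then kmpDescend lst pi x k' else 0
termination_by k

-- body of `for i in range(1, n)` appending pi[i]
def kmpStep (lst : List Int) (pi : List Nat) (i : Nat) : List Nat :=
  let x := lst.getD i 0
  let k := kmpDescend lst pi x (pi.getD (i - 1) 0)
  pi ++ [if x == lst.getD k 0 then k + 1 else k]

def kmpPi (lst : List Int) : List Nat :=
  (List.range' 1 (lst.length - 1)).foldl (kmpStep lst) [0]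

def find_cycle_alt (lst : List Int) : Option Int :=
  let n := lst.length
  if n = 0 then none
  else
    let p := n - (kmpPi lst).getD (n - 1) 0
    if p < n then some (p : Int) else none

-- ===== PRECONDITION & SPEC =====
def Spec_find_cycle (lst : List Int) (out : Option Int) : Prop := out = find_cycle_alt lst
instance (lst : List Int) (out : Option Int) : Decidable (Spec_find_cycle lst out) := by unfold Spec_find_cycle; infer_instance

-- ===== CLAIM (what is proved, stated in full; the proofs are below) =====
def Claim_equal_find_cycle : Prop := ∀ (lst : List Int), Dom_find_cycle lst → Spec_find_cycle lst (find_cycle lst)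

-- ===== LEMMAS AND PROOFS =====

-- `brB lst m k`: the prefix of length k is a proper border of the prefix of length m
def brB (lst : List Int) (m k : Nat) : Bool :=
  decide (k < m) && decide (∀ t, t < k → lst.getD t 0 = lst.getD (t + (m - k)) 0)

def maxBr (lst : List Int) (m : Nat) : Nat :=
  Nat.findGreatest (fun k => brB lst m k = true) (m - 1)

theorem brB_iff (lst : List Int) (m k : Nat) :
    brB lst m k = true ↔ k < m ∧ ∀ t, t < k → lst.getD t 0 = lst.getD (t + (m - k)) 0 := by
  simp [brB]

theorem br_zero (lst : List Int) (m : Nat) (h : 0 < m) : brB lst m 0 = true := by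
  rw [brB_iff]; exact ⟨h, by omega⟩

theorem br_trans (lst : List Int) {m k j : Nat}
    (h1 : brB lst m k = true) (h2 : brB lst k j = true) : brB lst m j = true := by
  rw [brB_iff] at *
  obtain ⟨hk, H1⟩ := h1
  obtain ⟨hj, H2⟩ := h2
  refine ⟨by omega, fun t ht => ?_⟩
  have e1 : lst.getD t 0 = lst.getD (t + (k - j)) 0 := H2 t ht
  have e2 : lst.getD (t + (k - j)) 0 = lst.getD (t + (k - j) + (m - k)) 0 := H1 _ (by omega)
  have e3 : t + (k - j) + (m - k) = t + (m - j) := by omega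
  rw [e1, e2, e3]

theorem br_nest (lst : List Int) {m k j : Nat}
    (h1 : brB lst m k = true) (h2 : brB lst m j = true) (hlt : j < k) : brB lst k j = true := by
  rw [brB_iff] at *
  obtain ⟨hk, H1⟩ := h1
  obtain ⟨hj, H2⟩ := h2
  refine ⟨hlt, fun t ht => ?_⟩
  have e1 : lst.getD (t + (k - j)) 0 = lst.getD (t + (k - j) + (m - k)) 0 := H1 _ (by omega)
  have e2 : t + (k - j) + (m - k) = t + (m - j) := by omega
  rw [H2 t ht, ← e2, ← e1]

theorem br_succ_iff (lst : List Int) (i k : Nat) :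
    brB lst (i + 1) (k + 1) = true ↔
      brB lst i k = true ∧ lst.getD k 0 = lst.getD i 0 := by
  rw [brB_iff, brB_iff]
  constructor
  · rintro ⟨hk, H⟩
    have hki : k < i := by omega
    refine ⟨⟨hki, fun t ht => ?_⟩, ?_⟩
    · have := H t (by omega)
      have e : t + (i + 1 - (k + 1)) = t + (i - k) := by omega
      rwa [e] at this
    · have := H k (by omega)
      have e : k + (i + 1 - (k + 1)) = i := by omega
      rwa [e] at this
  · rintro ⟨⟨hki, H⟩, hlast⟩
    refine ⟨by omega, fun t ht => ?_⟩
    rcases Nat.lt_or_ge t k with h | h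
    · have := H t h
      have e : t + (i + 1 - (k + 1)) = t + (i - k) := by omega
      rw [e]; exact this
    · have htk : t = k := by omega
      subst htk
      have e : t + (i + 1 - (t + 1)) = i := by omega
      rw [e]; exact hlast

theorem maxBr_le (lst : List Int) (m : Nat) : maxBr lst m ≤ m - 1 :=
  Nat.findGreatest_le _

theorem br_maxBr (lst : List Int) (m : Nat) (h : 1 ≤ m) : brB lst m (maxBr lst m) = true := by
  exact Nat.findGreatest_spec (P := fun k => brB lst m k = true) (Nat.zero_le _)
    (br_zero lst m (by omega))

theorem le_maxBr (lst : List Int) {m k : Nat} (h : brB lst m k = true) : k ≤ maxBr lst m := by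
  apply Nat.le_findGreatest _ h
  have := (brB_iff lst m k).mp h
  omega

theorem descend_spec (lst : List Int) (pi : List Nat) (i : Nat) (x : Int)
    (hpi : ∀ t, t + 1 < i → pi.getD t 0 = maxBr lst (t + 1)) :
    ∀ k, brB lst i k = true →
      (∀ j, brB lst i j = true → x = lst.getD j 0 → j ≤ k) →
      (kmpDescend lst pi x k = 0 ∨
        (brB lst i (kmpDescend lst pi x k) = true ∧ x = lst.getD (kmpDescend lst pi x k) 0)) ∧
      ∀ j, brB lst i j = true → x = lst.getD j 0 → j ≤ kmpDescend lst pi x k := by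
  intro k
  induction k using Nat.strong_induction_on with
  | _ k IH =>
    intro hk hmax
    rcases Nat.eq_zero_or_pos k with hk0 | hkpos
    · subst hk0
      rw [kmpDescend, if_pos rfl]
      exact ⟨Or.inl rfl, hmax⟩
    · have hki : k < i := by have := (brB_iff lst i k).mp hk; exact this.1
      by_cases hbeq : x == lst.getD k 0
      · rw [kmpDescend]
        rw [if_neg (by omega), if_pos hbeq]
        exact ⟨Or.inr ⟨hk, eq_of_beq hbeq⟩, hmax⟩
      · have hne : x ≠ lst.getD k 0 := by
          intro h; exact hbeq (by simp [h])
        have hpik : pi.getD (k - 1) 0 = maxBr lst k := by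
          have := hpi (k - 1) (by omega)
          have e : k - 1 + 1 = k := by omega
          rwa [e] at this
        have hk'lt : pi.getD (k - 1) 0 < k := by
          have := maxBr_le lst k; omega
        rw [kmpDescend]
        rw [if_neg (by omega), if_neg hbeq]
        simp only [dif_pos hk'lt]
        apply IH _ hk'lt
        · exact br_trans lst hk (by rw [hpik]; exact br_maxBr lst k (by omega))
        · intro j hj hxj
          have hjk : j ≤ k := hmax j hj hxj
          have hjk' : j < k := by
            rcases Nat.lt_or_ge j k with h | h
            · exact h
            · exfalso; apply hne
              have hjke : j = k := by omega
              rw [hxj, hjke]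
          rw [hpik]
          exact le_maxBr lst (br_nest lst hk hj hjk')

theorem getD_append_lt {pi : List Nat} {v : Nat} {t : Nat} (h : t < pi.length) :
    (pi ++ [v]).getD t 0 = pi.getD t 0 := by
  simp [List.getD, List.getElem?_append_left h]

theorem getD_append_last {pi : List Nat} {v : Nat} :
    (pi ++ [v]).getD pi.length 0 = v := by
  simp [List.getD]

theorem step_spec (lst : List Int) (pi : List Nat) (i : Nat) (hi : 1 ≤ i)
    (hlen : pi.length = i) (hpi : ∀ t, t < i → pi.getD t 0 = maxBr lst (t + 1)) :
    (kmpStep lst pi i).length = i + 1 ∧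
      ∀ t, t < i + 1 → (kmpStep lst pi i).getD t 0 = maxBr lst (t + 1) := by
  have hpi' : ∀ t, t + 1 < i → pi.getD t 0 = maxBr lst (t + 1) := fun t ht => hpi t (by omega)
  set x := lst.getD i 0 with hx
  have hk0 : pi.getD (i - 1) 0 = maxBr lst i := by
    have := hpi (i - 1) (by omega)
    have e : i - 1 + 1 = i := by omega
    rwa [e] at this
  have hbrk0 : brB lst i (maxBr lst i) = true := br_maxBr lst i hi
  have hmax0 : ∀ j, brB lst i j = true → x = lst.getD j 0 → j ≤ pi.getD (i - 1) 0 := by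
    intro j hj _; rw [hk0]; exact le_maxBr lst hj
  obtain ⟨hr, hrmax⟩ := descend_spec lst pi i x hpi' (pi.getD (i - 1) 0)
    (by rw [hk0]; exact hbrk0) hmax0
  set r := kmpDescend lst pi x (pi.getD (i - 1) 0) with hrdef
  have hbri_r : brB lst i r = true := by
    rcases hr with h0 | ⟨h, _⟩
    · rw [h0]; exact br_zero lst i (by omega)
    · exact h
  have hveq : (if x == lst.getD r 0 then r + 1 else r) = maxBr lst (i + 1) := by
    by_cases hbeq : x == lst.getD r 0
    · rw [if_pos hbeq]
      have hxr : x = lst.getD r 0 := eq_of_beq hbeq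
      have hbr : brB lst (i + 1) (r + 1) = true :=
        (br_succ_iff lst i r).mpr ⟨hbri_r, by rw [← hxr, hx]⟩
      have h1 : r + 1 ≤ maxBr lst (i + 1) := le_maxBr lst hbr
      have h2 : maxBr lst (i + 1) ≤ r + 1 := by
        rcases Nat.eq_zero_or_pos (maxBr lst (i + 1)) with h0 | hpos
        · omega
        · obtain ⟨j, hj⟩ : ∃ j, maxBr lst (i + 1) = j + 1 :=
            ⟨maxBr lst (i + 1) - 1, by omega⟩
          have hbrM : brB lst (i + 1) (j + 1) = true := by
            rw [← hj]; exact br_maxBr lst (i + 1) (by omega)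
          obtain ⟨hbj, hje⟩ := (br_succ_iff lst i j).mp hbrM
          have : j ≤ r := hrmax j hbj (by rw [hje, ← hx])
          omega
      omega
    · rw [if_neg hbeq]
      have hr0 : r = 0 := by
        rcases hr with h0 | ⟨_, hxe⟩
        · exact h0
        · exact absurd (by simp [hxe]) hbeq
      have : maxBr lst (i + 1) = 0 := by
        rcases Nat.eq_zero_or_pos (maxBr lst (i + 1)) with h0 | hpos
        · exact h0
        · exfalso
          obtain ⟨j, hj⟩ : ∃ j, maxBr lst (i + 1) = j + 1 :=
            ⟨maxBr lst (i + 1) - 1, by omega⟩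
          have hbrM : brB lst (i + 1) (j + 1) = true := by
            rw [← hj]; exact br_maxBr lst (i + 1) (by omega)
          obtain ⟨hbj, hje⟩ := (br_succ_iff lst i j).mp hbrM
          have hjr : j ≤ r := hrmax j hbj (by rw [hje, ← hx])
          have hj0 : j = 0 := by omega
          subst hj0
          apply hbeq
          rw [hr0, beq_iff_eq, hx]
          exact hje.symm
      omega
  constructor
  · simp [kmpStep, hlen]
  · intro t ht
    unfold kmpStep
    simp only [← hx, ← hrdef]
    rcases Nat.lt_or_ge t i with hlt | hge
    · rw [getD_append_lt (by omega)]
      exact hpi t hlt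
    · have hti : t = i := by omega
      subst hti
      rw [← hlen, getD_append_last, hlen]
      exact hveq

theorem fold_inv (lst : List Int) :
    ∀ (cnt : Nat) (pi : List Nat) (s : Nat), 1 ≤ s → pi.length = s →
      (∀ t, t < s → pi.getD t 0 = maxBr lst (t + 1)) →
      ((List.range' s cnt).foldl (kmpStep lst) pi).length = s + cnt ∧
        ∀ t, t < s + cnt →
          ((List.range' s cnt).foldl (kmpStep lst) pi).getD t 0 = maxBr lst (t + 1) := by
  intro cnt
  induction cnt with
  | zero => intro pi s hs hlen hpi; simpa using ⟨hlen, fun t ht => hpi t (by omega)⟩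
  | succ c IH =>
    intro pi s hs hlen hpi
    rw [List.range'_succ]
    simp only [List.foldl_cons]
    obtain ⟨hlen', hpi'⟩ := step_spec lst pi s hs hlen hpi
    have := IH (kmpStep lst pi s) (s + 1) (by omega) hlen' hpi'
    constructor
    · rw [this.1]; omega
    · intro t ht; exact this.2 t (by omega)

theorem kmpPi_spec (lst : List Int) (h : 1 ≤ lst.length) :
    ∀ t, t < lst.length → (kmpPi lst).getD t 0 = maxBr lst (t + 1) := by
  unfold kmpPi
  have base : ∀ t, t < 1 → ([0] : List Nat).getD t 0 = maxBr lst (t + 1) := by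
    intro t ht
    have ht0 : t = 0 := by omega
    subst ht0
    simp [maxBr]
  have := fold_inv lst (lst.length - 1) [0] 1 (le_refl 1) rfl base
  intro t ht
  exact this.2 t (by omega)

theorem fcCheck_iff_br (lst : List Int) (c : Nat) (hc : 1 ≤ c) (hcn : c < lst.length) :
    fcCheck lst c = true ↔ brB lst lst.length (lst.length - c) = true := by
  rw [brB_iff]
  simp only [fcCheck, List.all_eq_true, List.mem_range, beq_iff_eq]
  constructor
  · intro H
    refine ⟨by omega, fun t ht => ?_⟩
    have e : lst.length - (lst.length - c) = c := by omega
    rw [e]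
    exact H t (by omega)
  · rintro ⟨_, H⟩
    intro i hi
    have := H i (by omega)
    have e : lst.length - (lst.length - c) = c := by omega
    rwa [e] at this

theorem fcLoop_none (lst : List Int) :
    ∀ c, (∀ j, c ≤ j → j < lst.length → fcCheck lst j = false) → fcLoop lst c = none := by
  suffices H : ∀ d c, lst.length - c ≤ d →
      (∀ j, c ≤ j → j < lst.length → fcCheck lst j = false) → fcLoop lst c = none by
    intro c h; exact H (lst.length - c) c (le_refl _) h
  intro d
  induction d with
  | zero =>
    intro c hd h
    rw [fcLoop, if_neg (by omega)]
  | succ d IH =>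
    intro c hd h
    rw [fcLoop]
    by_cases hc : c < lst.length
    · rw [if_pos hc, h c le_rfl hc]
      simp only [Bool.false_eq_true, if_false]
      exact IH (c + 1) (by omega) (fun j hj hjn => h j (by omega) hjn)
    · rw [if_neg hc]

theorem fcLoop_some (lst : List Int) :
    ∀ m c, c ≤ m → m < lst.length → fcCheck lst m = true →
      (∀ j, c ≤ j → j < m → fcCheck lst j = false) → fcLoop lst c = some (m : Int) := by
  intro m
  suffices H : ∀ d c, m - c ≤ d → c ≤ m → m < lst.length → fcCheck lst m = true →
      (∀ j, c ≤ j → j < m → fcCheck lst j = false) → fcLoop lst c = some (m : Int) by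
    intro c h1 h2 h3 h4; exact H (m - c) c (le_refl _) h1 h2 h3 h4
  intro d
  induction d with
  | zero =>
    intro c hd hcm hmn hchk _
    have hce : c = m := by omega
    subst hce
    rw [fcLoop, if_pos hmn, hchk]
    simp
  | succ d IH =>
    intro c hd hcm hmn hchk hmin
    rcases Nat.eq_or_lt_of_le hcm with hce | hclt
    · subst hce
      rw [fcLoop, if_pos hmn, hchk]
      simp
    · rw [fcLoop, if_pos (by omega), hmin c le_rfl hclt]
      simp only [Bool.false_eq_true, if_false]
      exact IH (c + 1) (by omega) (by omega) hmn hchk (fun j hj hjm => hmin j (by omega) hjm)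

-- ===== VERDICT (by name: the statement is the Claim_ definition above) =====
theorem find_cycle_spec : Claim_equal_find_cycle := by
  intro lst _
  unfold Spec_find_cycle find_cycle find_cycle_alt
  rcases Nat.eq_zero_or_pos lst.length with hn0 | hn
  · rw [fcLoop, if_neg (by omega)]
    simp [hn0]
  · have hK : (kmpPi lst).getD (lst.length - 1) 0 = maxBr lst lst.length := by
      have := kmpPi_spec lst hn (lst.length - 1) (by omega)
      have e : lst.length - 1 + 1 = lst.length := by omega
      rwa [e] at this
    set K := maxBr lst lst.length with hKdef
    have hKle : K ≤ lst.length - 1 := maxBr_le lst lst.length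
    simp only [if_neg (by omega : ¬ lst.length = 0), hK]
    rcases Nat.eq_zero_or_pos K with hK0 | hKpos
    · rw [hK0]
      rw [if_neg (by omega)]
      apply fcLoop_none
      intro j hj hjn
      by_contra hfc
      have hfc' : fcCheck lst j = true := by
        cases h : fcCheck lst j
        · exact absurd h hfc
        · rfl
      have hbr := (fcCheck_iff_br lst j hj hjn).mp hfc'
      have := le_maxBr lst hbr
      omega
    · rw [if_pos (by omega)]
      apply fcLoop_some
      · omega
      · omega
      · apply (fcCheck_iff_br lst (lst.length - K) (by omega) (by omega)).mpr
        have e : lst.length - (lst.length - K) = K := by omega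
        rw [e]
        exact br_maxBr lst lst.length (by omega)
      · intro j hj hjm
        by_contra hfc
        have hfc' : fcCheck lst j = true := by
          cases h : fcCheck lst j
          · exact absurd h hfc
          · rfl
        have hbr := (fcCheck_iff_br lst j hj (by omega)).mp hfc'
        have := le_maxBr lst hbr
        omega
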